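-- pv_equiv track=rewrite | github.com/AmmadGetlicensed/laravel-codebase-graph | laravelgraph/pipeline/phase_08_community.py | _fqn_from_nid
-- ===== SOURCE A (Python) =====
-- def _fqn_from_nid(nid: str) -> str:
--     """Strip the type prefix from a node_id to get the FQN-like part."""
--     for prefix in ("class:", "method:", "function:", "trait:", "interface:"):
--         if nid.startswith(prefix):
--             raw = nid[len(prefix):]
--             # method node_ids are "method:FQN::methodName" — take everything before "::"
--             if prefix == "method:" and "::" in raw:
--                 raw = raw.split("::")[0]
--             return raw
--     return ""
-- ===== SOURCE B (Python) =====
-- _TYPES = frozenset({"class", "method", "function", "trait", "interface"})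
--
--
-- def _fqn_from_nid(nid: str) -> str:
--     """Strip the type prefix from a node_id to get the FQN-like part."""
--     head, sep, rest = nid.partition(":")
--     if not sep or head not in _TYPES:
--         return ""
--     if head == "method":
--         rest = rest.partition("::")[0]
--     return rest
-- ===== Notes on version B (the rewrite author's own statement) =====
-- stated objective: idiomatic
-- what changed: Replaces the loop trying each of the five type prefixes with startswith by a single str.partition at the first colon followed by a frozenset lookup of the bare type name (and a second partition on the double-colon for methods).
import Mathlib
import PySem

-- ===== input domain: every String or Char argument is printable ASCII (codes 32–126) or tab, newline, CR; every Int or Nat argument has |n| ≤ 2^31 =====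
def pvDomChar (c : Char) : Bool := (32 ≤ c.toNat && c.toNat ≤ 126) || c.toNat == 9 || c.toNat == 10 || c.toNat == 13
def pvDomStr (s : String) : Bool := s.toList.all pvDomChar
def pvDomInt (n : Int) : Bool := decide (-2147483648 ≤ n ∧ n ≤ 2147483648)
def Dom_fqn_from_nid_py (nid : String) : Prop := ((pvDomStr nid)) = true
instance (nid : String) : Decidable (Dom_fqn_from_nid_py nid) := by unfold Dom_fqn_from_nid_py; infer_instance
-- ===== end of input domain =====

-- B replaces A's scan over five "type:" prefixes by one partition at the first ':' plus a set lookup of the bare type name; objective: idiomatic.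


-- ===== PORT A =====
-- the for-loop over the prefix tuple, as structural recursion over the list of prefixes
def fqnGoA (nid : List Char) : List (List Char) → List Char
  | [] => []
  | p :: ps =>
    if PySem.Chars.startswith nid p then
      let raw := PySem.Chars.slice nid (some (PySem.Chars.len p)) none   -- nid[len(prefix):]
      if p == "method:".toList && PySem.Chars.isIn "::".toList raw then
        (PySem.Chars.splitOn raw "::".toList).headD []                   -- raw.split("::")[0] (split is never empty)
      else raw
    else fqnGoA nid ps

def fqn_from_nid_py (nid : String) : String :=
  String.ofList (fqnGoA nid.toList
    ["class:".toList, "method:".toList, "function:".toList, "trait:".toList, "interface:".toList])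

-- ===== PORT B =====
-- str.partition(sep) for nonempty sep, exact: cut at the first occurrence (PySem.Chars.find)
def pyPartition (s sep : List Char) : List Char × List Char × List Char :=
  let i := PySem.Chars.find s sep
  if i = -1 then (s, [], [])
  else (s.take i.toNat, sep, s.drop (i.toNat + sep.length))

def pvTypes : List (List Char) :=
  ["class".toList, "method".toList, "function".toList, "trait".toList, "interface".toList]

def fqn_from_nid_py_alt (nid : String) : String :=
  let p := pyPartition nid.toList ":".toList
  let head := p.1
  let sep := p.2.1
  let rest := p.2.2
  if sep.isEmpty || !((PySem.Set.ofList pvTypes).contains head) then String.ofList []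
  else if head == "method".toList then String.ofList (pyPartition rest "::".toList).1
  else String.ofList rest

-- ===== PRECONDITION & SPEC =====
def Spec_fqn_from_nid_py (nid : String) (out : String) : Prop := out = fqn_from_nid_py_alt nid
instance (nid : String) (out : String) : Decidable (Spec_fqn_from_nid_py nid out) := by unfold Spec_fqn_from_nid_py; infer_instance

-- ===== CLAIM (what is proved, stated in full; the proofs are below) =====
def Claim_equal_fqn_from_nid_py : Prop := ∀ (nid : String), Dom_fqn_from_nid_py nid → Spec_fqn_from_nid_py nid (fqn_from_nid_py nid)

-- ===== LEMMAS AND PROOFS =====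

def pvBefore (sep : List Char) : List Char → List Char
  | [] => []
  | c :: rest => if sep.isPrefixOf (c :: rest) then [] else c :: pvBefore sep rest

theorem go_acc (sep : List Char) (fuel : Nat) (l cur : List Char) (acc : List (List Char)) :
    PySem.Chars.splitOn.go sep fuel l cur acc
      = acc.reverse ++ PySem.Chars.splitOn.go sep fuel l cur [] := by
  induction fuel generalizing l cur acc with
  | zero => simp [PySem.Chars.splitOn.go]
  | succ f ih =>
    cases l with
    | nil => simp [PySem.Chars.splitOn.go]
    | cons c rest =>
      rw [PySem.Chars.splitOn.go, PySem.Chars.splitOn.go]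
      split
      · rw [ih _ _ (_ :: acc), ih _ _ ([_])]
        simp
      · exact ih _ _ _

theorem go_head (sep : List Char) (fuel : Nat) (l cur : List Char) (h : l.length < fuel) :
    (PySem.Chars.splitOn.go sep fuel l cur []).head?.getD [] = cur.reverse ++ pvBefore sep l := by
  induction fuel generalizing l cur with
  | zero => omega
  | succ f ih =>
    cases l with
    | nil => simp [PySem.Chars.splitOn.go, pvBefore]
    | cons c rest =>
      rw [PySem.Chars.splitOn.go]
      split
      · rename_i hp
        rw [go_acc]
        simp [pvBefore, hp]
      · rename_i hp
        rw [ih rest (c :: cur) (by simpa using Nat.lt_of_succ_lt_succ h)]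
        simp [pvBefore, hp]

theorem splitOn_head (l sep : List Char) :
    (PySem.Chars.splitOn l sep).head?.getD [] = pvBefore sep l := by
  rw [PySem.Chars.splitOn, go_head sep (l.length+1) l [] (by omega)]
  simp

theorem before_of_first_occ (sep : List Char) (l : List Char) (n : Nat)
    (h1 : sep <+: l.drop n) (h2 : ∀ j < n, ¬ sep <+: l.drop j) :
    pvBefore sep l = l.take n := by
  induction l generalizing n with
  | nil => cases n <;> rfl
  | cons c rest ih =>
    cases n with
    | zero =>
      rw [pvBefore, if_pos (List.isPrefixOf_iff_prefix.mpr (by simpa using h1))]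
      rfl
    | succ m =>
      rw [pvBefore, if_neg (fun hp => h2 0 (by omega) (by simpa using List.isPrefixOf_iff_prefix.mp hp))]
      rw [List.take_succ_cons, ih m (by simpa using h1) (fun j hj => by simpa using h2 (j+1) (by omega))]

theorem prefix_colon_iff (s t : List Char) (ht : ':' ∉ t) :
    (t ++ [':']) <+: s ↔ (0 ≤ PySem.Chars.find s [':'] ∧ s.take (PySem.Chars.find s [':']).toNat = t) := by
  constructor
  · rintro ⟨u, hu⟩
    have hinf : [':'] <:+: s := ⟨t, u, by simpa using hu⟩
    have hpos : 0 ≤ PySem.Chars.find s [':'] := by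
      have := PySem.Chars.neg_one_le_find (s := s) (sub := [':'])
      have hne := (PySem.Chars.find_ne_neg_one_iff s [':']).mpr hinf
      omega
    refine ⟨hpos, ?_⟩
    obtain ⟨hocc, hmin⟩ := PySem.Chars.find_spec hpos
    set i := (PySem.Chars.find s [':']).toNat with hi
    have hs : s = t ++ ':' :: u := by simpa using hu.symm
    -- not i < t.length : char at position i would be in t and equal ':'
    have h1 : ¬ i < t.length := by
      intro hlt
      have : s.drop i = t.drop i ++ ':' :: u := by
        rw [hs, List.drop_append_of_le_length (by omega)]
      obtain ⟨v, hv⟩ := hocc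
      rw [this] at hv
      have htd : t.drop i ≠ [] := by simp [List.drop_eq_nil_iff]; omega
      obtain ⟨d, ds, hd⟩ := List.exists_cons_of_ne_nil htd
      rw [hd] at hv
      simp at hv
      have : d ∈ t := by
        have : d ∈ t.drop i := by rw [hd]; exact List.mem_cons_self ..
        exact List.mem_of_mem_drop this
      exact ht (hv.1 ▸ this)
    have h2 : ¬ t.length < i := by
      intro hlt
      exact hmin t.length hlt ⟨u, by rw [hs, List.drop_append_of_le_length (by omega)]; simp⟩
    have hie : i = t.length := by omega
    rw [hie, hs, List.take_left]
  · rintro ⟨hpos, htake⟩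
    obtain ⟨hocc, -⟩ := PySem.Chars.find_spec hpos
    set i := (PySem.Chars.find s [':']).toNat with hi
    obtain ⟨u, hu⟩ := hocc
    refine ⟨u, ?_⟩
    calc t ++ [':'] ++ u = t ++ (':' :: u) := by simp
    _ = s.take i ++ s.drop i := by rw [htake, ← hu]; rfl
    _ = s := List.take_append_drop i s

theorem main_eq (nid : String) : fqn_from_nid_py nid = fqn_from_nid_py_alt nid := by
  unfold fqn_from_nid_py fqn_from_nid_py_alt pyPartition
  set s := nid.toList with hs
  have key : ∀ t : List Char, (t ++ [':']) <+: s → [':'] <:+: s :=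
    fun t hp => ((List.suffix_append t [':']).isInfix).trans hp.isInfix
  by_cases hf : PySem.Chars.find s [':'] = -1
  · have hni : ¬ [':'] <:+: s := (PySem.Chars.find_eq_neg_one_iff s [':']).mp hf
    have hsw : ∀ t : List Char, PySem.Chars.startswith s (t ++ [':']) = false := by
      intro t
      rw [← Bool.not_eq_true, PySem.Chars.startswith_iff]
      exact fun hp => hni (key t hp)
    have h1 : PySem.Chars.startswith s ['c','l','a','s','s',':'] = false := hsw "class".toList
    have h2 : PySem.Chars.startswith s ['m','e','t','h','o','d',':'] = false := hsw "method".toList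
    have h3 : PySem.Chars.startswith s ['f','u','n','c','t','i','o','n',':'] = false := hsw "function".toList
    have h4 : PySem.Chars.startswith s ['t','r','a','i','t',':'] = false := hsw "trait".toList
    have h5 : PySem.Chars.startswith s ['i','n','t','e','r','f','a','c','e',':'] = false := hsw "interface".toList
    simp [fqnGoA, h1, h2, h3, h4, h5, hf]
  · have hpos : 0 ≤ PySem.Chars.find s [':'] := by
      have := PySem.Chars.neg_one_le_find s [':']
      omega
    set i := (PySem.Chars.find s [':']).toNat with hi
    have hile : i ≤ s.length := by
      have := PySem.Chars.find_le_length s [':']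
      omega
    have hiff : ∀ t : List Char, ':' ∉ t →
        (PySem.Chars.startswith s (t ++ [':']) = true ↔ s.take i = t) := by
      intro t ht
      rw [PySem.Chars.startswith_iff, prefix_colon_iff s t ht]
      exact ⟨fun h => h.2, fun h => ⟨hpos, h⟩⟩
    have hlen : ∀ t : List Char, s.take i = t → i = t.length := by
      intro t h
      have := congrArg List.length h
      simp at this
      omega
    by_cases hc1 : s.take i = "class".toList
    · have hsw1 : PySem.Chars.startswith s ['c','l','a','s','s',':'] = true :=
        (hiff "class".toList (by decide)).mpr hc1
      have hil : i = 5 := hlen _ hc1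
      have hslice : PySem.List.slice s (some 6) = List.drop 6 s := by
        simpa using PySem.List.slice_from_natCast s 6
      have hc1' : List.take 5 s = "class".toList := hil ▸ hc1
      simp [fqnGoA, hsw1, hf, ← hi, hil, hc1', hslice, PySem.Set.ofList, pvTypes]
    by_cases hc2 : s.take i = "method".toList
    · have hswC : PySem.Chars.startswith s ['c','l','a','s','s',':'] = false := by
        rw [Bool.eq_false_iff]
        intro h
        exact absurd (hc2.symm.trans ((hiff "class".toList (by decide)).mp h)) (by decide)
      have hswM : PySem.Chars.startswith s ['m','e','t','h','o','d',':'] = true :=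
        (hiff "method".toList (by decide)).mpr hc2
      have hil : i = 6 := hlen _ hc2
      have hc2' : List.take 6 s = "method".toList := hil ▸ hc2
      have hslice : PySem.List.slice s (some 7) = List.drop 7 s := by
        simpa using PySem.List.slice_from_natCast s 7
      by_cases hin : PySem.Chars.find (List.drop 7 s) [':',':'] = -1
      · have hnoi : PySem.Chars.isIn [':',':'] (List.drop 7 s) = false :=
          (PySem.Chars.isIn_eq_false_iff _ _).mpr ((PySem.Chars.find_eq_neg_one_iff _ _).mp hin)
        simp [fqnGoA, hswC, hswM, hf, ← hi, hil, hc2', hslice, hnoi, hin, PySem.Set.ofList, pvTypes]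
      · have hpos2 : 0 ≤ PySem.Chars.find (List.drop 7 s) [':',':'] := by
          have := PySem.Chars.neg_one_le_find (List.drop 7 s) [':',':']
          omega
        have hisi : PySem.Chars.isIn [':',':'] (List.drop 7 s) = true :=
          (PySem.Chars.isIn_iff_infix _ _).mpr ((PySem.Chars.find_ne_neg_one_iff _ _).mp hin)
        obtain ⟨hocc2, hmin2⟩ := PySem.Chars.find_spec hpos2
        have hhd : (PySem.Chars.splitOn (List.drop 7 s) [':',':']).head?.getD []
            = List.take (PySem.Chars.find (List.drop 7 s) [':',':']).toNat (List.drop 7 s) := by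
          rw [splitOn_head]
          exact before_of_first_occ _ _ _ hocc2 hmin2
        simp [fqnGoA, hswC, hswM, hf, ← hi, hil, hc2', hslice, hisi, hin, hhd, PySem.Set.ofList, pvTypes]
    · by_cases hc3 : s.take i = "function".toList
      · have hswC : PySem.Chars.startswith s ['c','l','a','s','s',':'] = false := by
          rw [Bool.eq_false_iff]
          intro h
          exact absurd (hc3.symm.trans ((hiff "class".toList (by decide)).mp h)) (by decide)
        have hswM : PySem.Chars.startswith s ['m','e','t','h','o','d',':'] = false := by
          rw [Bool.eq_false_iff]
          intro h
          exact absurd (hc3.symm.trans ((hiff "method".toList (by decide)).mp h)) (by decide)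
        have hswF : PySem.Chars.startswith s ['f','u','n','c','t','i','o','n',':'] = true :=
          (hiff "function".toList (by decide)).mpr hc3
        have hil : i = 8 := hlen _ hc3
        have hc3' : List.take 8 s = "function".toList := hil ▸ hc3
        have hslice : PySem.List.slice s (some 9) = List.drop 9 s := by
          simpa using PySem.List.slice_from_natCast s 9
        simp [fqnGoA, hswC, hswM, hswF, hf, ← hi, hil, hc3', hslice, PySem.Set.ofList, pvTypes]
      · by_cases hc4 : s.take i = "trait".toList
        · have hswC : PySem.Chars.startswith s ['c','l','a','s','s',':'] = false := by
            rw [Bool.eq_false_iff]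
            intro h
            exact absurd (hc4.symm.trans ((hiff "class".toList (by decide)).mp h)) (by decide)
          have hswM : PySem.Chars.startswith s ['m','e','t','h','o','d',':'] = false := by
            rw [Bool.eq_false_iff]
            intro h
            exact absurd (hc4.symm.trans ((hiff "method".toList (by decide)).mp h)) (by decide)
          have hswF : PySem.Chars.startswith s ['f','u','n','c','t','i','o','n',':'] = false := by
            rw [Bool.eq_false_iff]
            intro h
            exact absurd (hc4.symm.trans ((hiff "function".toList (by decide)).mp h)) (by decide)
          have hswT : PySem.Chars.startswith s ['t','r','a','i','t',':'] = true :=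
            (hiff "trait".toList (by decide)).mpr hc4
          have hil : i = 5 := hlen _ hc4
          have hc4' : List.take 5 s = "trait".toList := hil ▸ hc4
          have hslice : PySem.List.slice s (some 6) = List.drop 6 s := by
            simpa using PySem.List.slice_from_natCast s 6
          simp [fqnGoA, hswC, hswM, hswF, hswT, hf, ← hi, hil, hc4', hslice, PySem.Set.ofList, pvTypes]
        · by_cases hc5 : s.take i = "interface".toList
          · have hswC : PySem.Chars.startswith s ['c','l','a','s','s',':'] = false := by
              rw [Bool.eq_false_iff]
              intro h
              exact absurd (hc5.symm.trans ((hiff "class".toList (by decide)).mp h)) (by decide)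
            have hswM : PySem.Chars.startswith s ['m','e','t','h','o','d',':'] = false := by
              rw [Bool.eq_false_iff]
              intro h
              exact absurd (hc5.symm.trans ((hiff "method".toList (by decide)).mp h)) (by decide)
            have hswF : PySem.Chars.startswith s ['f','u','n','c','t','i','o','n',':'] = false := by
              rw [Bool.eq_false_iff]
              intro h
              exact absurd (hc5.symm.trans ((hiff "function".toList (by decide)).mp h)) (by decide)
            have hswT : PySem.Chars.startswith s ['t','r','a','i','t',':'] = false := by
              rw [Bool.eq_false_iff]
              intro h
              exact absurd (hc5.symm.trans ((hiff "trait".toList (by decide)).mp h)) (by decide)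
            have hswI : PySem.Chars.startswith s ['i','n','t','e','r','f','a','c','e',':'] = true :=
              (hiff "interface".toList (by decide)).mpr hc5
            have hil : i = 9 := hlen _ hc5
            have hc5' : List.take 9 s = "interface".toList := hil ▸ hc5
            have hslice : PySem.List.slice s (some 10) = List.drop 10 s := by
              simpa using PySem.List.slice_from_natCast s 10
            simp [fqnGoA, hswC, hswM, hswF, hswT, hswI, hf, ← hi, hil, hc5', hslice, PySem.Set.ofList, pvTypes]
          · have hsw : ∀ t : List Char, ':' ∉ t → s.take i ≠ t →
                PySem.Chars.startswith s (t ++ [':']) = false := by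
              intro t ht hne
              rw [Bool.eq_false_iff]
              intro h
              exact hne ((hiff t ht).mp h)
            have h1 : PySem.Chars.startswith s ['c','l','a','s','s',':'] = false :=
              hsw "class".toList (by decide) hc1
            have h2 : PySem.Chars.startswith s ['m','e','t','h','o','d',':'] = false :=
              hsw "method".toList (by decide) hc2
            have h3 : PySem.Chars.startswith s ['f','u','n','c','t','i','o','n',':'] = false :=
              hsw "function".toList (by decide) hc3
            have h4 : PySem.Chars.startswith s ['t','r','a','i','t',':'] = false :=
              hsw "trait".toList (by decide) hc4
            have h5 : PySem.Chars.startswith s ['i','n','t','e','r','f','a','c','e',':'] = false :=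
              hsw "interface".toList (by decide) hc5
            simp [fqnGoA, h1, h2, h3, h4, h5, hf, ← hi, PySem.Set.ofList, pvTypes]
            intro h
            exact absurd (h hc1 hc2 hc3 hc4) hc5

-- ===== VERDICT (by name: the statement is the Claim_ definition above) =====
theorem fqn_from_nid_py_spec : Claim_equal_fqn_from_nid_py := by
  unfold Claim_equal_fqn_from_nid_py Spec_fqn_from_nid_py
  intro nid _
  exact main_eq nid
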